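-- pv_equiv track=rewrite | github.com/Vinicento/roulette_monte_carlo | simulations.py | custom_cumsum
-- ===== SOURCE A (Python) =====
-- def custom_cumsum(numbers):
--     cumsum = 0
--     result = []
--     for number in numbers:
--         cumsum += number
--         if cumsum < 0:
--             cumsum = 0
--         result.append(cumsum)
--     return result
-- ===== SOURCE B (Python) =====
-- def custom_cumsum(numbers):
--     # staged passes: prefix sums, then running minima of prefixes (with S_0 = 0),
--     # then clamped[i] = prefix[i] - min_prefix[i]
--     prefixes = []
--     s = 0
--     for x in numbers:
--         s += x
--         prefixes.append(s)
--     mins = []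
--     m = 0
--     for p in prefixes:
--         m = min(m, p)
--         mins.append(m)
--     return [p - m for p, m in zip(prefixes, mins)]
-- ===== Notes on version B (the rewrite author's own statement) =====
-- stated objective: alternative
-- what changed: Replaces the single reset-to-zero accumulator loop with three staged passes built on the identity clamped[i] = prefix_sum[i] - min(0, prefix_sum[0..i]): a prefix-sum scan, a running-minimum scan over those prefixes, and a zip subtracting them.
import Mathlib
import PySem

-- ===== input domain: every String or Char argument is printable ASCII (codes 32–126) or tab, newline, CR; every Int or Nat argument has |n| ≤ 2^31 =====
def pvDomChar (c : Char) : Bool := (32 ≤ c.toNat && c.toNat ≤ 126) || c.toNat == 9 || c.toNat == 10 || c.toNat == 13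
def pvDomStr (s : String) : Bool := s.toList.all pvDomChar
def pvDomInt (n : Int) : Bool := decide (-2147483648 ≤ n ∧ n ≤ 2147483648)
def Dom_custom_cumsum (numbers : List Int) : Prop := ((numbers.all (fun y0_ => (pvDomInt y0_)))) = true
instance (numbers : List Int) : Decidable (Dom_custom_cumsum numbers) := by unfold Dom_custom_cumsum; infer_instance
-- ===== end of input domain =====

-- B replaces A's reset-to-zero accumulator loop by three staged passes
-- (prefix sums, running minima, pointwise subtraction); equal return values proved below.

-- ===== PORT A =====
-- Port of A: single loop, accumulator clamped to 0, appending each value.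
def ccLoop : List Int → Int → List Int → List Int
  | [], _, acc => acc
  | n :: t, c, acc =>
    let c1 := c + n
    let c2 := if c1 < 0 then 0 else c1
    ccLoop t c2 (acc ++ [c2])

def custom_cumsum (numbers : List Int) : List Int := ccLoop numbers 0 []

-- ===== PORT B =====
-- Port of B: pass 1 — prefix sums.
def ccPrefixes : List Int → Int → List Int
  | [], _ => []
  | x :: t, s => (s + x) :: ccPrefixes t (s + x)

-- Pass 2 — running minima of the prefixes (seeded with S_0 = 0).
def ccMins : List Int → Int → List Int
  | [], _ => []
  | p :: t, m => min m p :: ccMins t (min m p)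

-- Pass 3 — pointwise subtraction (the zip comprehension).
def custom_cumsum_alt (numbers : List Int) : List Int :=
  let ps := ccPrefixes numbers 0
  List.zipWith (fun p m => p - m) ps (ccMins ps 0)

-- ===== PRECONDITION & SPEC =====
def Spec_custom_cumsum (numbers : List Int) (out : List Int) : Prop := out = custom_cumsum_alt numbers
instance (numbers : List Int) (out : List Int) : Decidable (Spec_custom_cumsum numbers out) := by unfold Spec_custom_cumsum; infer_instance

-- ===== CLAIM =====
def Claim_equal_custom_cumsum : Prop := ∀ (numbers : List Int), Dom_custom_cumsum numbers → Spec_custom_cumsum numbers (custom_cumsum numbers)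

-- ===== LEMMAS AND PROOFS =====
theorem ccLoop_eq_scans (l : List Int) (s m : Int) (acc : List Int) (h : m ≤ s) :
    ccLoop l (s - m) acc
      = acc ++ List.zipWith (fun p m => p - m) (ccPrefixes l s) (ccMins (ccPrefixes l s) m) := by
  induction l generalizing s m acc with
  | nil => simp [ccLoop, ccPrefixes, ccMins]
  | cons n t ih =>
    simp only [ccLoop, ccPrefixes, ccMins, List.zipWith]
    by_cases hlt : s + n < m
    · have h1 : s - m + n < 0 := by omega
      have hm : min m (s + n) = s + n := by omega
      simp only [if_pos h1, hm]
      simpa [List.append_assoc] using ih (s + n) (s + n) (acc ++ [(0 : Int)]) (le_refl _)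
    · have h1 : ¬ s - m + n < 0 := by omega
      have hm : min m (s + n) = m := by omega
      simp only [if_neg h1, hm]
      have e : s - m + n = s + n - m := by ring
      rw [e]
      simpa [List.append_assoc] using ih (s + n) m (acc ++ [s + n - m]) (by omega)

-- ===== VERDICT =====
theorem custom_cumsum_spec : Claim_equal_custom_cumsum := by
  intro numbers _
  unfold Spec_custom_cumsum custom_cumsum custom_cumsum_alt
  simpa using ccLoop_eq_scans numbers 0 0 [] (le_refl 0)
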